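-- pv_equiv track=rewrite | github.com/silam741852963/web2product-catalog | scripts/components/csv_loader.py | _resolve_keys
-- ===== SOURCE A (Python) =====
-- from typing import List, Dict, Optional, Iterable, Tuple, Set
--
-- def _resolve_keys(fieldnames: Optional[List[str]]) -> Tuple[str, str, str]:
--     """
--     Pick header names (case-insensitive) for (id, name, url).
--     Prefers new dataset headers, but falls back to legacy ones.
--     Returns original-cased header names found in the CSV (or '' if missing).
--     """
--     fset = { (fn or "").strip().lower(): fn for fn in (fieldnames or []) }
--
--     def pick(*candidates: str) -> str:
--         for c in candidates:
--             if c in fset: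
--                 return fset[c]
--         return ""
--
--     id_key   = pick("bvdid", "hojin_id", "id")
--     name_key = pick("name", "company_name", "company")
--     url_key  = pick("url", "website", "homepage", "home_page")
--     return id_key, name_key, url_key
-- ===== SOURCE B (Python) =====
-- _GROUPS = (
--     ("bvdid", "hojin_id", "id"),
--     ("name", "company_name", "company"),
--     ("url", "website", "homepage", "home_page"),
-- )
--
-- def _resolve_keys(fieldnames):
--     """Pick header names (case-insensitive) for (id, name, url).
--     Single pass over the fieldnames: for each header, find its priority rank
--     in each candidate group and keep the best-ranked (last on ties) header."""
--     best = [(len(g), "") for g in _GROUPS]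
--     for fn in (fieldnames or []):
--         key = (fn or "").strip().lower()
--         for i, g in enumerate(_GROUPS):
--             try:
--                 r = g.index(key)
--             except ValueError:
--                 continue
--             if r <= best[i][0]:
--                 best[i] = (r, fn)
--     return best[0][1], best[1][1], best[2][1]
-- ===== Notes on version B (the rewrite author's own statement) =====
-- stated objective: alternative
-- what changed: Replaces the dict-then-pick candidate lookup with a single pass over the fieldnames that, for each header, ranks it inside each candidate group and keeps the best-ranked (last on ties) header per group.
import Mathlib
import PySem

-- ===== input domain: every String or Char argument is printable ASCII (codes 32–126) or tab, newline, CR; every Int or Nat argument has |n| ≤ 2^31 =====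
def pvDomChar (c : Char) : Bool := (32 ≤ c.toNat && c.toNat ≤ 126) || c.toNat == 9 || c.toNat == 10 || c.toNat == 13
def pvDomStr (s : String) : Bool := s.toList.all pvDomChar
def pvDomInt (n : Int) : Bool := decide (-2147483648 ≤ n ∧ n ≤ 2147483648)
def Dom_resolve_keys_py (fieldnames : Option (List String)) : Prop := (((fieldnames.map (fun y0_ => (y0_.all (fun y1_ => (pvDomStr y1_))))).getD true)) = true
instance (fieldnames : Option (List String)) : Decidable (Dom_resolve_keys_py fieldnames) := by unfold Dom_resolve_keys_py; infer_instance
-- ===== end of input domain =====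

-- B replaces A's dict-then-pick candidate lookup by a SINGLE PASS over the fieldnames that
-- ranks each header inside each candidate group and keeps the best-ranked (last on ties)
-- header per group; alternative decomposition, same results.

-- (fn or "") on a Python str: "" if empty, else fn (used by both Pythons)
def pvOrEmpty (fn : String) : String := if fn = "" then "" else fn

-- (fn or "").strip().lower()
def pvNorm (fn : String) : String := PySem.Str.lower (PySem.Str.strip (pvOrEmpty fn))

-- the three candidate groups (shared literals of both Pythons)
def pvGId : List String := ["bvdid", "hojin_id", "id"]
def pvGName : List String := ["name", "company_name", "company"]
def pvGUrl : List String := ["url", "website", "homepage", "home_page"]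

-- ===== PORT A =====
-- for c in candidates: if c in fset: return fset[c]; return ""
def pvPickA (fset : PySem.Dict String String) : List String → String
  | [] => ""
  | c :: rest =>
    match fset.get? c with
    | some v => v
    | none => pvPickA fset rest

def resolve_keys_py (fieldnames : Option (List String)) : String × String × String :=
  let fset : PySem.Dict String String :=
    (fieldnames.getD []).foldl (fun d fn => d.insert (pvNorm fn) fn) PySem.Dict.empty
  let id_key := pvPickA fset pvGId
  let name_key := pvPickA fset pvGName
  let url_key := pvPickA fset pvGUrl
  (id_key, name_key, url_key)

-- ===== PORT B =====
-- one group's update for one header: r = g.index(key); if r <= best[0]: best = (r, fn)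
def pvStep (g : List String) (st : Nat × String) (fn : String) : Nat × String :=
  match PySem.List.index? g (pvNorm fn) with
  | none => st
  | some r => if r ≤ st.1 then (r, fn) else st

-- the inner 'for i, g in enumerate(_GROUPS)' body, unrolled over the three groups
def pvStep3 (st : (Nat × String) × (Nat × String) × (Nat × String)) (fn : String) :
    (Nat × String) × (Nat × String) × (Nat × String) :=
  (pvStep pvGId st.1 fn, pvStep pvGName st.2.1 fn, pvStep pvGUrl st.2.2 fn)

def resolve_keys_py_alt (fieldnames : Option (List String)) : String × String × String :=
  let best := (fieldnames.getD []).foldl pvStep3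
    ((pvGId.length, ""), (pvGName.length, ""), (pvGUrl.length, ""))
  (best.1.2, best.2.1.2, best.2.2.2)

-- ===== PRECONDITION & SPEC =====
def Spec_resolve_keys_py (fieldnames : Option (List String)) (out : String × String × String) : Prop := out = resolve_keys_py_alt fieldnames
instance (fieldnames : Option (List String)) (out : String × String × String) : Decidable (Spec_resolve_keys_py fieldnames out) := by unfold Spec_resolve_keys_py; infer_instance

-- ===== CLAIM (what is proved, stated in full; the proofs are below) =====
def Claim_equal_resolve_keys_py : Prop := ∀ (fieldnames : Option (List String)), Dom_resolve_keys_py fieldnames → Spec_resolve_keys_py fieldnames (resolve_keys_py fieldnames)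

-- ===== LEMMAS AND PROOFS =====

-- proof-side spec: the LAST fn in fields whose normalized form equals c
def pvScan (fields : List String) (c : String) : Option String :=
  fields.foldl (fun best fn => if pvNorm fn = c then some fn else best) none

-- proof-side spec: first candidate with a match, its last matching header
def pvPickS (fields : List String) : List String → String
  | [] => ""
  | c :: rest =>
    match pvScan fields c with
    | some v => v
    | none => pvPickS fields rest

-- A's dict built by folding inserts answers c exactly like the last-match scan
theorem pv_get_fold_insert (fs : List String) (d : PySem.Dict String String) (c : String) :
    ((fs.foldl (fun d fn => d.insert (pvNorm fn) fn) d).get? c)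
      = fs.foldl (fun best fn => if pvNorm fn = c then some fn else best) (d.get? c) := by
  induction fs generalizing d with
  | nil => rfl
  | cons fn fs ih =>
    have h2 : (d.insert (pvNorm fn) fn).get? c = if pvNorm fn = c then some fn else d.get? c := by
      by_cases h : pvNorm fn = c
      · subst h; rw [if_pos rfl]; exact PySem.Dict.get?_insert_self _ _ _
      · rw [if_neg h]; exact PySem.Dict.get?_insert_of_ne d fn (fun hc => h hc.symm)
    simp only [List.foldl_cons]
    rw [ih, h2]

theorem pv_pickA_eq_pickS (fields : List String) (cands : List String) :
    pvPickA (fields.foldl (fun d fn => d.insert (pvNorm fn) fn) PySem.Dict.empty) cands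
      = pvPickS fields cands := by
  induction cands with
  | nil => rfl
  | cons c rest ih =>
    have hd : (PySem.Dict.empty : PySem.Dict String String).get? c = none := rfl
    simp only [pvPickA, pvPickS, pvScan, pv_get_fold_insert, hd, ih]

theorem pv_scan_append (fs : List String) (fn c : String) :
    pvScan (fs ++ [fn]) c = if pvNorm fn = c then some fn else pvScan fs c := by
  simp [pvScan, List.foldl_append]

-- pvPickS from scan facts: all candidates miss → ""
theorem pv_pickS_none (fields : List String) (g : List String)
    (h : ∀ c ∈ g, pvScan fields c = none) : pvPickS fields g = "" := by
  induction g with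
  | nil => rfl
  | cons c rest ih =>
    simp only [pvPickS, h c List.mem_cons_self, ih (fun x hx => h x (List.mem_cons_of_mem _ hx))]

-- pvPickS from scan facts: first k candidates miss, k-th hits v → v
theorem pv_pickS_of_scan (fields : List String) :
    ∀ (g : List String) (k : Nat) (hk : k < g.length) (v : String),
      (∀ j (hj : j < k), pvScan fields (g[j]'(Nat.lt_trans hj hk)) = none) →
      pvScan fields (g[k]'hk) = some v → pvPickS fields g = v := by
  intro g
  induction g with
  | nil => intro k hk; simp at hk
  | cons c rest ih =>
    intro k hk v hnone hsome
    cases k with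
    | zero =>
      simp only [List.getElem_cons_zero] at hsome
      simp only [pvPickS, hsome]
    | succ k =>
      have h0 : pvScan fields c = none := by
        have := hnone 0 (Nat.succ_pos k); simpa using this
      simp only [pvPickS, h0]
      exact ih k (by simpa using hk) v
        (fun j hj => by have := hnone (j+1) (Nat.succ_lt_succ hj); simpa using this)
        (by simpa using hsome)

-- the triple fold computes the three independent per-group folds
theorem pv_fold3_eq (fs : List String) (a b c : Nat × String) :
    fs.foldl pvStep3 (a, b, c)
      = (fs.foldl (pvStep pvGId) a, fs.foldl (pvStep pvGName) b, fs.foldl (pvStep pvGUrl) c) := by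
  induction fs generalizing a b c with
  | nil => rfl
  | cons fn fs ih => simp only [List.foldl_cons, pvStep3, ih]

-- core invariant of the one-pass rank fold, by reverse induction on the fields
theorem pv_fold_inv (g : List String) (fs : List String) :
    (fs.foldl (pvStep g) (g.length, "")).1 ≤ g.length ∧
    (∀ j (hj : j < (fs.foldl (pvStep g) (g.length, "")).1) (hjl : j < g.length),
        pvScan fs (g[j]'hjl) = none) ∧
    (∀ h : (fs.foldl (pvStep g) (g.length, "")).1 < g.length,
        pvScan fs (g[(fs.foldl (pvStep g) (g.length, "")).1]'h)
          = some (fs.foldl (pvStep g) (g.length, "")).2) ∧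
    ((fs.foldl (pvStep g) (g.length, "")).1 = g.length →
        (fs.foldl (pvStep g) (g.length, "")).2 = "") := by
  induction fs using List.reverseRecOn with
  | nil =>
    refine ⟨le_refl _, ?_, ?_, fun _ => rfl⟩
    · intro j hj hjl; rfl
    · intro h; simp at h
  | append_singleton fs fn ih =>
    obtain ⟨h1, h2, h3, h4⟩ := ih
    have hfold : (fs ++ [fn]).foldl (pvStep g) (g.length, "")
        = pvStep g (fs.foldl (pvStep g) (g.length, "")) fn := by
      simp [List.foldl_append]
    set st := fs.foldl (pvStep g) (g.length, "") with hst
    rw [hfold]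
    unfold pvStep
    cases hidx : PySem.List.index? g (pvNorm fn) with
    | none =>
      -- pvNorm fn is in no candidate slot: scans unchanged
      have hnm : pvNorm fn ∉ g := (PySem.List.index?_eq_none_iff g (pvNorm fn)).mp hidx
      have hne : ∀ j (hjl : j < g.length), pvNorm fn ≠ g[j]'hjl := by
        intro j hjl he; exact hnm (he ▸ List.getElem_mem hjl)
      refine ⟨h1, ?_, ?_, h4⟩
      · intro j hj hjl; rw [pv_scan_append, if_neg (hne j hjl)]; exact h2 j hj hjl
      · intro h; rw [pv_scan_append, if_neg (hne _ h)]; exact h3 h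
    | some r =>
      dsimp only
      obtain ⟨hr, hgr, hmin⟩ := PySem.List.getElem_of_index?_eq_some hidx
      by_cases hle : r ≤ st.1
      · rw [if_pos hle]
        refine ⟨le_of_lt hr, ?_, ?_, ?_⟩
        · intro j hj hjl
          rw [pv_scan_append, if_neg (fun he => hmin j hj he.symm)]
          exact h2 j (lt_of_lt_of_le hj hle) hjl
        · intro h
          simp only
          rw [pv_scan_append, if_pos hgr.symm]
        · intro h; simp only at h; omega
      · rw [if_neg hle]
        replace hle := Nat.lt_of_not_le hle
        refine ⟨h1, ?_, ?_, ?_⟩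
        · intro j hj hjl
          rw [pv_scan_append, if_neg (fun he => hmin j (Nat.lt_trans hj hle) he.symm)]
          exact h2 j hj hjl
        · intro h
          rw [pv_scan_append, if_neg (fun he => hmin st.1 hle he.symm)]
          exact h3 h
        · intro h
          have : st.1 < g.length := Nat.lt_trans hle hr
          omega

-- per-group: the one-pass fold's value is the candidate-wise pick
theorem pv_fold_eq_pickS (g : List String) (fs : List String) :
    (fs.foldl (pvStep g) (g.length, "")).2 = pvPickS fs g := by
  obtain ⟨h1, h2, h3, h4⟩ := pv_fold_inv g fs
  set st := fs.foldl (pvStep g) (g.length, "") with hst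
  rcases lt_or_eq_of_le h1 with hlt | heq
  · exact (pv_pickS_of_scan fs g st.1 hlt st.2 (fun j hj => h2 j hj _) (h3 hlt)).symm
  · rw [h4 heq]
    refine (pv_pickS_none fs g ?_).symm
    intro c hc
    obtain ⟨j, hjl, hje⟩ := List.mem_iff_getElem.mp hc
    rw [← hje]; exact h2 j (heq ▸ hjl) hjl

-- ===== VERDICT (by name: the statement is the Claim_ definition above) =====
theorem resolve_keys_py_spec : Claim_equal_resolve_keys_py := by
  intro fieldnames _
  unfold Spec_resolve_keys_py resolve_keys_py resolve_keys_py_alt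
  simp only [pv_fold3_eq, pv_fold_eq_pickS, pv_pickA_eq_pickS]
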